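-- pv_equiv track=rewrite | github.com/synapsecode/kolamcreate | lsystem.py | generate_lsystem_state
-- ===== SOURCE A (Python) =====
-- def generate_lsystem_state(state, n):
--     for _ in range(n):
--         final_state = ''
--         for ch in state:
--             if ch == 'F':
--                 final_state += 'F'
--             elif ch == 'A':
--                 final_state += 'AFBFA'
--             elif ch == 'B':
--                 final_state += 'AFBFBFBFA'
--             elif ch == 'C':
--                 final_state += 'C'  # C command passes through unchanged
--             else:
--                 final_state += ch  # Pass through other commands (L, R, etc.)
--         state = final_state
--     return state
-- ===== SOURCE B (Python) =====
-- RULE = {'A': 'AFBFA', 'B': 'AFBFBFBFA'}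
--
-- def expand(ch, k):
--     if k <= 0 or ch not in RULE:
--         return ch
--     return ''.join(expand(c, k - 1) for c in RULE[ch])
--
-- def generate_lsystem_state(state, n):
--     return ''.join(expand(ch, n) for ch in state)
-- ===== Notes on version B (the rewrite author's own statement) =====
-- stated objective: alternative
-- what changed: Replaces n breadth-first whole-string rewriting passes with a per-character depth-first recursive expander applied once to each input character.
import Mathlib
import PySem

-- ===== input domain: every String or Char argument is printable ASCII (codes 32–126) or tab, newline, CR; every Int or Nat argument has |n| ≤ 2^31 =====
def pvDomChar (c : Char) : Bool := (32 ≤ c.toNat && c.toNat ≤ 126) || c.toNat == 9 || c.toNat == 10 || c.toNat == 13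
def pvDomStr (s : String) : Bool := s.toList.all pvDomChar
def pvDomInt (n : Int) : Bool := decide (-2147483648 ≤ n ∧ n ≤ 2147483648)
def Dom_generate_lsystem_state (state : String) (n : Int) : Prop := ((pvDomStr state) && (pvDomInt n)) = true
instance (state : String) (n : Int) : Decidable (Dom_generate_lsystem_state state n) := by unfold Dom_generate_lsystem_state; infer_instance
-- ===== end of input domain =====

-- B expands each character once with a depth-first recursive expander (short-circuiting
-- characters without a rule) instead of A's n breadth-first whole-string passes
-- (objective: alternative decomposition).


-- ===== PORT A =====
-- the inner for-loop body: the if/elif chain appending to final_state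
def pvStepCharA (acc : String) (ch : Char) : String :=
  if ch = 'F' then acc ++ "F"
  else if ch = 'A' then acc ++ "AFBFA"
  else if ch = 'B' then acc ++ "AFBFBFBFA"
  else if ch = 'C' then acc ++ "C"
  else acc.push ch

def generate_lsystem_state (state : String) (n : Int) : String :=
  (PySem.List.pyRange 0 n 1).foldl
    (fun st _ => st.toList.foldl pvStepCharA "") state

-- ===== PORT B =====
-- RULE[ch] of Source B, as character lists ([ch] when ch has no rule, i.e. RULE.get fallback)
def pvRuleB (ch : Char) : List Char :=
  if ch = 'A' then ['A','F','B','F','A']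
  else if ch = 'B' then ['A','F','B','F','B','F','B','F','A']
  else [ch]

-- expand(ch, k) of Source B ('k <= 0 or ch not in RULE' base case; Nat depth realises k ≤ 0)
def pvExpand (ch : Char) : Nat → List Char
  | 0 => [ch]
  | k + 1 =>
      if ch = 'A' ∨ ch = 'B' then ((pvRuleB ch).map (fun c => pvExpand c k)).flatten
      else [ch]

def generate_lsystem_state_alt (state : String) (n : Int) : String :=
  String.ofList ((state.toList.map (fun ch => pvExpand ch n.toNat)).flatten)

-- ===== PRECONDITION & SPEC =====
def Spec_generate_lsystem_state (state : String) (n : Int) (out : String) : Prop := out = generate_lsystem_state_alt state n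
instance (state : String) (n : Int) (out : String) : Decidable (Spec_generate_lsystem_state state n out) := by unfold Spec_generate_lsystem_state; infer_instance

-- ===== CLAIM (what is proved, stated in full; the proofs are below) =====
def Claim_equal_generate_lsystem_state : Prop := ∀ (state : String) (n : Int), Dom_generate_lsystem_state state n → Spec_generate_lsystem_state state n (generate_lsystem_state state n)

-- ===== LEMMAS AND PROOFS =====

-- one breadth-first rewriting pass, on character lists
def pvStep (l : List Char) : List Char := (l.map pvRuleB).flatten

theorem pvStepCharA_toList (acc : String) (ch : Char) :
    (pvStepCharA acc ch).toList = acc.toList ++ pvRuleB ch := by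
  unfold pvStepCharA pvRuleB
  split_ifs with h1 h2 h3 h4 <;> simp_all

theorem pvFoldA (l : List Char) (acc : String) :
    (l.foldl pvStepCharA acc).toList = acc.toList ++ pvStep l := by
  induction l generalizing acc with
  | nil => simp [pvStep]
  | cons c t ih =>
      simp only [List.foldl, ih, pvStepCharA_toList]
      simp [pvStep]

theorem pvExpand_other (ch : Char) (k : Nat) (h : ¬ (ch = 'A' ∨ ch = 'B')) :
    pvExpand ch k = [ch] := by
  cases k with
  | zero => rfl
  | succ k => simp [pvExpand, h]

theorem pvExpand_zero_flat (l : List Char) :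
    (l.map (fun ch => pvExpand ch 0)).flatten = l := by
  induction l with
  | nil => rfl
  | cons c t ih =>
      simp only [List.map_cons, List.flatten_cons, ih]
      rfl

theorem pvExpand_succ_flat (l : List Char) (k : Nat) :
    (l.map (fun ch => pvExpand ch (k + 1))).flatten
      = ((pvStep l).map (fun ch => pvExpand ch k)).flatten := by
  induction l with
  | nil => rfl
  | cons c t ih =>
      simp only [List.map_cons, List.flatten_cons, ih]
      rw [show pvStep (c :: t) = pvRuleB c ++ pvStep t from by simp [pvStep],
        List.map_append, List.flatten_append]
      by_cases hc : c = 'A' ∨ c = 'B'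
      · rw [show pvExpand c (k + 1)
            = ((pvRuleB c).map (fun x => pvExpand x k)).flatten from by
              simp [pvExpand, hc]]
      · rw [show pvExpand c (k + 1) = [c] from pvExpand_other c (k + 1) hc,
          show pvRuleB c = [c] from by
            rcases not_or.mp hc with ⟨h1, h2⟩; simp [pvRuleB, h1, h2]]
        simp [pvExpand_other c k hc]

theorem pvExpand_iterate (l : List Char) (k : Nat) :
    (l.map (fun ch => pvExpand ch k)).flatten = pvStep^[k] l := by
  induction k generalizing l with
  | zero => simp [pvExpand_zero_flat]
  | succ k ih =>
      rw [pvExpand_succ_flat, ih, Function.iterate_succ_apply]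

theorem pvFoldRange (l : List Int) (s : String) :
    l.foldl (fun st (_ : Int) => st.toList.foldl pvStepCharA "") s
      = String.ofList (pvStep^[l.length] s.toList) := by
  induction l generalizing s with
  | nil => simp
  | cons a t ih =>
      simp only [List.foldl, ih, List.length_cons, Function.iterate_succ_apply]
      congr 1
      rw [show (s.toList.foldl pvStepCharA "").toList = pvStep s.toList from by
        rw [pvFoldA]; rfl]

theorem generate_lsystem_state_eq (state : String) (n : Int) :
    generate_lsystem_state state n = generate_lsystem_state_alt state n := by
  unfold generate_lsystem_state generate_lsystem_state_alt
  rw [pvFoldRange, pvExpand_iterate]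
  have h : (PySem.List.pyRange 0 n 1).length = n.toNat := by
    rw [PySem.List.length_pyRange_one]; omega
  rw [h]

-- ===== VERDICT (by name: the statement is the Claim_ definition above) =====
theorem generate_lsystem_state_spec : Claim_equal_generate_lsystem_state := by
  intro state n _
  exact generate_lsystem_state_eq state n
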